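-- pv_equiv track=rewrite | github.com/Antonc15/TypeStrong-GroupProject | decInt.py | state2
-- ===== SOURCE A (Python) =====
-- def state2(word, index):
--     #Checks if the given input has no more characters left.
--     if index >= len(word):
--         # Since state 0 isn't an accepting statement, return False.
--         return True
--
--     #Gets the character of input at the specified index.
--     char = word[index]
--
--     #Checks if the given character is in the array of allowed characters.
--     if char == '0':
--         #If the char is in the allowed characters it will go into the next state (state2).
--         return state2(word, index + 1)
--     if char == '_':
--         return state3(word, index + 1)
--
--     #If there are no valid characters it will be rejected and return False.
--     return False
--
-- def state3(word, index):
--     #Checks if the given input has no more characters left.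
--     if index >= len(word):
--         # Since state 0 isn't an accepting statement, return False.
--         return False
--
--     #Gets the character of input at the specified index.
--     char = word[index]
--
--     #Checks if the given character is in the array of allowed characters.
--     if char == '0':
--         #If the char is in the allowed characters it will go into the next state (state2).
--         return state2(word, index + 1)
--
--     #If there are no valid characters it will be rejected and return False.
--     return False
-- ===== SOURCE B (Python) =====
-- def state2(word, index):
--     delta = {(2, '0'): 2, (2, '_'): 3, (3, '0'): 2}
--     state = 2
--     i = index
--     while i < len(word):
--         state = delta.get((state, word[i]))
--         if state is None:
--             return False
--         i += 1
--     return state == 2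
-- ===== Notes on version B (the rewrite author's own statement) =====
-- stated objective: alternative
-- what changed: Replaced the pair of mutually recursive state functions by a table-driven DFA: a transition dict keyed by (state, char) consulted in one iterative loop, rejecting on a missing entry and accepting iff the loop ends in state 2.
import Mathlib
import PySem

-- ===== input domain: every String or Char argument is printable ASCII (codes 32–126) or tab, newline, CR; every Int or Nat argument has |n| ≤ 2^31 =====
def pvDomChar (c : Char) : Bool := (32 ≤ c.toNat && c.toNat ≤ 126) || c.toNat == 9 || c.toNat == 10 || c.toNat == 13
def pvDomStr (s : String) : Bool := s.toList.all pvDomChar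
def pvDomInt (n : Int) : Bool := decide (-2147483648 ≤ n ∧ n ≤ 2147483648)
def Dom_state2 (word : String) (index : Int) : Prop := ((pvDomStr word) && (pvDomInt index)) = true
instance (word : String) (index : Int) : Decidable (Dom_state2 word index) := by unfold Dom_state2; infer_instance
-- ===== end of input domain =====

-- B replaces A's two mutually recursive state functions by a table-driven DFA: one loop
-- consulting a transition dict keyed by (state, char); same O(n) cost, different decomposition.


-- ===== PORT A =====
-- Transliteration of A's mutually recursive state2/state3. The Python guard
-- 'index >= len(word)' is encoded as a structural fuel (len(word) - index).toNat,
-- which is 0 exactly when index >= len(word); where Python's word[index] would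
-- raise IndexError (pyGet? = none) the port returns false (excluded by Pre_).
mutual
def state2Go (word : String) : Nat → Int → Bool
  | 0, _ => true                       -- index >= len(word): accept
  | k + 1, index =>
    match PySem.Str.pyGet? word index with
    | none => false                    -- Python raises IndexError here
    | some char =>
      if char = '0' then state2Go word k (index + 1)
      else if char = '_' then state3Go word k (index + 1)
      else false
def state3Go (word : String) : Nat → Int → Bool
  | 0, _ => false                      -- index >= len(word): reject
  | k + 1, index =>
    match PySem.Str.pyGet? word index with
    | none => false                    -- Python raises IndexError here
    | some char =>
      if char = '0' then state2Go word k (index + 1)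
      else false
end

def state2 (word : String) (index : Int) : Bool :=
  state2Go word ((PySem.Str.len word : Int) - index).toNat index

-- ===== PORT B =====
-- Transliteration of Source B: the literal transition dict delta, and the single while-loop
-- (guard 'i < len(word)' as the same structural fuel) that looks (state, char) up in delta,
-- returns False on a miss, and on exit returns 'state == 2'.
def pvDelta : PySem.Dict (Int × Char) Int :=
  ((PySem.Dict.empty.insert (2, '0') 2).insert (2, '_') 3).insert (3, '0') 2

def state2AltGo (word : String) : Nat → Int → Int → Bool
  | 0, state, _ => state == 2          -- i >= len(word): loop over, accept iff state == 2
  | k + 1, state, i =>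
    match PySem.Str.pyGet? word i with
    | none => false                    -- Python raises IndexError here
    | some c =>
      match pvDelta.get? (state, c) with
      | none => false                  -- delta.get returned None: reject
      | some s => state2AltGo word k s (i + 1)

def state2_alt (word : String) (index : Int) : Bool :=
  state2AltGo word ((PySem.Str.len word : Int) - index).toNat 2 index

-- ===== PRECONDITION & SPEC =====
-- Pre_ excludes exactly index < -len(word), where Python's word[index] raises IndexError.
def Pre_state2 (word : String) (index : Int) : Prop :=
  -(PySem.Str.len word : Int) ≤ index
instance (word : String) (index : Int) : Decidable (Pre_state2 word index) := by
  unfold Pre_state2; infer_instance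
def pvWitness_state2 : String × Int := ("0_0", 0)

def Spec_state2 (word : String) (index : Int) (out : Bool) : Prop := out = state2_alt word index
instance (word : String) (index : Int) (out : Bool) : Decidable (Spec_state2 word index out) := by unfold Spec_state2; infer_instance

-- ===== CLAIM =====
def Claim_equal_state2 : Prop := ∀ (word : String) (index : Int), Dom_state2 word index → Pre_state2 word index → Spec_state2 word index (state2 word index)

-- ===== LEMMAS AND PROOFS =====

-- The transition table read from state 2 / state 3, as the branch tests A performs.
lemma delta_two (c : Char) :
    pvDelta.get? (2, c) = if c = '0' then some 2 else if c = '_' then some 3 else none := by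
  by_cases h0 : c = '0'
  · simp [pvDelta, PySem.Dict.get?_insert, h0]
  · by_cases h1 : c = '_'
    · simp [pvDelta, PySem.Dict.get?_insert, Prod.ext_iff, h1]
    · simp [pvDelta, PySem.Dict.get?_insert, PySem.Dict.get?_empty, Prod.ext_iff, h0, h1]

lemma delta_three (c : Char) :
    pvDelta.get? (3, c) = if c = '0' then some 2 else none := by
  by_cases h0 : c = '0'
  · simp [pvDelta, h0]
  · simp [pvDelta, PySem.Dict.get?_insert, PySem.Dict.get?_empty, Prod.ext_iff, h0]

lemma state_go_agree (word : String) (k : Nat) :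
    ∀ (index : Int),
      state2Go word k index = state2AltGo word k 2 index ∧
      state3Go word k index = state2AltGo word k 3 index := by
  induction k with
  | zero => intro index; exact ⟨rfl, rfl⟩
  | succ k ih =>
    intro index
    constructor
    · rw [state2Go, state2AltGo]
      cases PySem.Str.pyGet? word index with
      | none => rfl
      | some char =>
        dsimp only
        rw [delta_two]
        by_cases h0 : char = '0'
        · simp [h0, (ih (index + 1)).1]
        · by_cases h1 : char = '_'
          · simp [h1, (ih (index + 1)).2]
          · simp [h0, h1]
    · rw [state3Go, state2AltGo]
      cases PySem.Str.pyGet? word index with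
      | none => rfl
      | some char =>
        dsimp only
        rw [delta_three]
        by_cases h0 : char = '0'
        · simp [h0, (ih (index + 1)).1]
        · simp [h0]

-- ===== VERDICT =====
theorem state2_spec : Claim_equal_state2 := by
  intro word index _ _
  unfold Spec_state2 state2 state2_alt
  exact (state_go_agree word _ index).1
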